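-- pv_equiv track=rewrite | github.com/Erickrus/enigma | plugboard.py | non_alpha_split
-- ===== SOURCE A (Python) =====
-- def non_alpha_split(text):
--     res = []
--     text = "#"+text
--     for i in range(len(text)):
--         ch = text[i]
--         if ch.isalpha():
--             prevCh = text[i-1]
--             if prevCh.isalpha():
--                 res[-1] += ch
--             else:
--                 res.append(ch)
--     return res
-- ===== SOURCE B (Python) =====
-- from itertools import groupby
--
-- def non_alpha_split(text):
--     return ["".join(g) for k, g in groupby(text, str.isalpha) if k]
-- ===== Notes on version B (the rewrite author's own statement) =====
-- stated objective: faster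
-- what changed: Replaces A's sentinel-prefixed index loop with per-character look-back and in-place growth of the last result string by itertools.groupby keyed on str.isalpha, joining each alphabetic group once.
import Mathlib
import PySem

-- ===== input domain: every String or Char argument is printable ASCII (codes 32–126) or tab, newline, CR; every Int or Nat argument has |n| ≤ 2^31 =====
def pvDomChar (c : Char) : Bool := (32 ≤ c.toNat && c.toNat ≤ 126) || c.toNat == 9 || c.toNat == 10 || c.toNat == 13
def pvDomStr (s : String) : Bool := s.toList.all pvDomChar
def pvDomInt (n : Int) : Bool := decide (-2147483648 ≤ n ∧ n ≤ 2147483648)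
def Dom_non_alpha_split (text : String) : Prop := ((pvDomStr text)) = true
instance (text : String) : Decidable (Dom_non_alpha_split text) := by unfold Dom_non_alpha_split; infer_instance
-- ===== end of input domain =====

-- B replaces A's sentinel-prefixed look-back loop (which grows the last result string in
-- place, one character at a time) by grouping the characters into maximal same-isalpha runs
-- and joining each alphabetic group once (Python: itertools.groupby); a timing run
-- measured B faster on the generated inputs.

-- ===== PORT A =====
-- Python: res[-1] += ch.  Appends ch to the last element of res (only reached with res ≠ []).
def nasAppendLast : List String → Char → List String
  | [], _ => []
  | [s], c => [String.ofList (s.toList ++ [c])]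
  | s :: r :: rest, c => s :: nasAppendLast (r :: rest) c

-- A prepends the sentinel character and loops by index, reading text[i] and text[i-1];
-- ported as recursion carrying the previous character.  The i = 0 iteration (the sentinel)
-- is a no-op since the sentinel is not alphabetic, and text[i-1] is only read for i >= 1,
-- so the carried prev is exact.
def nasLoop : List Char → Char → List String → List String
  | [], _, res => res
  | ch :: rest, prev, res =>
      nasLoop rest ch
        (if PySem.Chars.isalpha ch then
           (if PySem.Chars.isalpha prev then nasAppendLast res ch
            else res ++ [String.ofList [ch]])
         else res)

def non_alpha_split (text : String) : List String :=
  nasLoop text.toList '#' []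

-- ===== PORT B =====
-- port of itertools.groupby(text, str.isalpha): maximal runs of equal key, with their key
def pyGroupBy (key : Char → Bool) : List Char → List (Bool × List Char)
  | [] => []
  | c :: cs =>
      match pyGroupBy key cs with
      | [] => [(key c, [c])]
      | (k, g) :: rest =>
          if key c = k then (key c, c :: g) :: rest
          else (key c, [c]) :: (k, g) :: rest

-- ["".join(g) for k, g in groupby(text, str.isalpha) if k]
def non_alpha_split_alt (text : String) : List String :=
  ((pyGroupBy PySem.Chars.isalpha text.toList).filter (·.1)).map (fun g => String.ofList g.2)

-- ===== PRECONDITION & SPEC =====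
def Spec_non_alpha_split (text : String) (out : List String) : Prop := out = non_alpha_split_alt text
instance (text : String) (out : List String) : Decidable (Spec_non_alpha_split text out) := by unfold Spec_non_alpha_split; infer_instance

-- ===== CLAIM (what is proved, stated in full; the proofs are below) =====
def Claim_equal_non_alpha_split : Prop := ∀ (text : String), Dom_non_alpha_split text → Spec_non_alpha_split text (non_alpha_split text)

-- ===== LEMMAS AND PROOFS =====

-- the alphabetic groups of a group list, joined
def nasOut : List (Bool × List Char) → List String
  | [] => []
  | (true, g) :: rest => String.ofList g :: nasOut rest
  | (false, _) :: rest => nasOut rest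

-- result of the loop when the previous character is alphabetic: the leading alphabetic
-- group (if any) is merged into the string s being grown
def nasMerge (s : String) : List (Bool × List Char) → List String
  | (true, g) :: rest => String.ofList (s.toList ++ g) :: nasOut rest
  | gs => s :: nasOut gs

lemma nasOut_eq_filter_map (gs : List (Bool × List Char)) :
    nasOut gs = (gs.filter (·.1)).map (fun g => String.ofList g.2) := by
  induction gs with
  | nil => rfl
  | cons p rest ih =>
    obtain ⟨k, g⟩ := p
    cases k <;> simp [nasOut, ih]

lemma nasAppendLast_snoc (rs : List String) (s : String) (c : Char) :
    nasAppendLast (rs ++ [s]) c = rs ++ [String.ofList (s.toList ++ [c])] := by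
  induction rs with
  | nil => rfl
  | cons r rs ih =>
    cases rs with
    | nil => rfl
    | cons r' rs' => simpa [nasAppendLast] using ih

lemma nasLoop_main (cs : List Char) :
    (∀ prev res, PySem.Chars.isalpha prev = false →
       nasLoop cs prev res = res ++ nasOut (pyGroupBy PySem.Chars.isalpha cs)) ∧
    (∀ (c : Char) (rs : List String) (s : String), PySem.Chars.isalpha c = true →
       nasLoop cs c (rs ++ [s]) = rs ++ nasMerge s (pyGroupBy PySem.Chars.isalpha cs)) := by
  induction cs with
  | nil =>
    exact ⟨fun _ res _ => by simp [nasLoop, pyGroupBy, nasOut],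
           fun c rs s _ => by simp [nasLoop, pyGroupBy, nasMerge, nasOut]⟩
  | cons d cs ih =>
    obtain ⟨ih1, ih2⟩ := ih
    constructor
    · intro prev res hprev
      by_cases hd : PySem.Chars.isalpha d = true
      · rcases hgs : pyGroupBy PySem.Chars.isalpha cs with _ | ⟨⟨k, g⟩, rest⟩
        · simp [nasLoop, hd, hprev, pyGroupBy, hgs, nasOut, nasMerge,
            ih2 d res (String.ofList [d]) hd]
        · cases k
          all_goals simp [nasLoop, hd, hprev, pyGroupBy, hgs, nasOut, nasMerge,
            ih2 d res (String.ofList [d]) hd]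
      · rw [Bool.not_eq_true] at hd
        rcases hgs : pyGroupBy PySem.Chars.isalpha cs with _ | ⟨⟨k, g⟩, rest⟩
        · simp [nasLoop, hd, pyGroupBy, hgs, nasOut, ih1 d res hd]
        · cases k
          all_goals simp [nasLoop, hd, pyGroupBy, hgs, nasOut, ih1 d res hd]
    · intro c rs s hc
      by_cases hd : PySem.Chars.isalpha d = true
      · have hstep : nasLoop (d :: cs) c (rs ++ [s])
            = nasLoop cs d (rs ++ [String.ofList (s.toList ++ [d])]) := by
          simp [nasLoop, hd, hc, nasAppendLast_snoc]
        rw [hstep, ih2 d rs (String.ofList (s.toList ++ [d])) hd]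
        rcases hgs : pyGroupBy PySem.Chars.isalpha cs with _ | ⟨⟨k, g⟩, rest⟩
        · simp [pyGroupBy, hgs, hd, nasMerge, nasOut]
        · cases k
          all_goals simp [pyGroupBy, hgs, hd, nasMerge, nasOut]
      · rw [Bool.not_eq_true] at hd
        have hstep : nasLoop (d :: cs) c (rs ++ [s]) = nasLoop cs d (rs ++ [s]) := by
          simp [nasLoop, hd]
        rcases hgs : pyGroupBy PySem.Chars.isalpha cs with _ | ⟨⟨k, g⟩, rest⟩
        · simp [hstep, ih1 d (rs ++ [s]) hd, pyGroupBy, hgs, hd, nasMerge, nasOut]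
        · cases k
          all_goals simp [hstep, ih1 d (rs ++ [s]) hd, pyGroupBy, hgs, hd, nasMerge, nasOut]

-- ===== VERDICT (by name: the statement is the Claim_ definition above) =====
theorem non_alpha_split_spec : Claim_equal_non_alpha_split := by
  intro text _
  unfold Spec_non_alpha_split non_alpha_split non_alpha_split_alt
  rw [(nasLoop_main text.toList).1 '#' [] (by decide)]
  simp [nasOut_eq_filter_map]
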